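-- pv_equiv track=rewrite | github.com/Ucanek/Blocking-game | Game/game.py | strategy_max_block
-- ===== SOURCE A (Python) =====
-- from typing import List, Tuple, Callable
--
-- Playground = List[List[bool]] # Definujeme typ Playground, což bude vždy pole polí boolů
--
-- def strategy_max_block(playground: Playground) -> Tuple[int, int]:
--     """
--     Maximálně blokující strategie. Vrátí souřadnice, na která se má hrát.
--     """
--     z = 5
--     playground_height = len(playground)
--     playground_width = len(playground[0])
--     for _ in range(5):
--         for y in range(len(playground)):
--             for x in range(len(playground[0])):
--                 h = 0
--                 if playground[int(y)][int(x)] == False: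
--                     h += 1
--                 if int(y)+1 < playground_height:
--                     if playground[int(y)+1][int(x)] == False:
--                         h += 1
--                 if int(y)-1 >= 0:
--                     if playground[int(y)-1][int(x)] == False:
--                         h += 1
--                 if int(x)+1 < playground_width:
--                     if playground[int(y)][int(x)+1] == False:
--                         h += 1
--                 if int(x)-1 >= 0:
--                     if playground[int(y)][int(x)-1] == False:
--                         h += 1
--                 if h == (z-_):
--                     return (str(y), str(x))
-- ===== SOURCE B (Python) =====
-- def strategy_max_block(playground):
--     height = len(playground)
--     width = len(playground[0])
--
--     def free(y, x):
--         return 0 <= y < height and 0 <= x < width and playground[y][x] == False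
--
--     def count(y, x):
--         return sum(1 for (yy, xx) in ((y, x), (y + 1, x), (y - 1, x), (y, x + 1), (y, x - 1)) if free(yy, xx))
--
--     cells = [(y, x) for y in range(height) for x in range(width)]
--     best = 0
--     for (y, x) in cells:
--         best = max(best, count(y, x))
--     if best == 0:
--         return None
--     for (y, x) in cells:
--         if count(y, x) == best:
--             return (str(y), str(x))
-- ===== Notes on version B (the rewrite author's own statement) =====
-- stated objective: alternative
-- what changed: A rescans the whole grid up to five times with decreasing target counts (h==5, then 4, ...) until a pass hits; B computes each cell's free-neighbour count once, takes the maximum in a single pass, and returns the first row-major cell achieving it (None if the maximum is 0).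
import Mathlib
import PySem

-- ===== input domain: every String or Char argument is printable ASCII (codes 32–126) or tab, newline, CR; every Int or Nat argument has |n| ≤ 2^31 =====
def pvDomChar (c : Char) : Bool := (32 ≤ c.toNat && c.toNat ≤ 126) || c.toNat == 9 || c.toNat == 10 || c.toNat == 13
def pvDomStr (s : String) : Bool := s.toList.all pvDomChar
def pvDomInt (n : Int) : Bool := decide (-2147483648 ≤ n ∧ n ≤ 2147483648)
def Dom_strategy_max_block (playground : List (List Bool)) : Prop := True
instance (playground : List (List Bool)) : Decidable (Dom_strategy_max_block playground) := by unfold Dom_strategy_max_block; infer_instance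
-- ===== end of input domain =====

-- B replaces A's five decreasing-target rescans by one max pass plus one argmax scan (objective: simpler/alternative).

-- ===== PORT A =====
-- playground[y][x], totalized (Pre_ keeps every access in range; the default is never read inside Pre_)
def cellAt (pg : List (List Bool)) (y x : Int) : Bool :=
  (PySem.List.pyGet? ((PySem.List.pyGet? pg y).getD []) x).getD true

-- the h-computation of A's inner loop body, step for step
def aCount (pg : List (List Bool)) (H W y x : Int) : Int :=
  let h : Int := 0
  let h := if cellAt pg y x = false then h + 1 else h
  let h := if y + 1 < H then (if cellAt pg (y + 1) x = false then h + 1 else h) else h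
  let h := if y - 1 ≥ 0 then (if cellAt pg (y - 1) x = false then h + 1 else h) else h
  let h := if x + 1 < W then (if cellAt pg y (x + 1) = false then h + 1 else h) else h
  let h := if x - 1 ≥ 0 then (if cellAt pg y (x - 1) = false then h + 1 else h) else h
  h

-- 'for x in range(...)' with the early return
def aScanX (pg : List (List Bool)) (H W t y : Int) : List Int → Option (String × String)
  | [] => none
  | x :: xs =>
    if aCount pg H W y x = t then some (PySem.Int.toStr y, PySem.Int.toStr x)
    else aScanX pg H W t y xs

-- 'for y in range(...)' with the early return
def aScanY (pg : List (List Bool)) (H W t : Int) (xs : List Int) : List Int → Option (String × String)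
  | [] => none
  | y :: ys =>
    match aScanX pg H W t y xs with
    | some r => some r
    | none => aScanY pg H W t xs ys

-- 'for _ in range(5)' with target z - _
def aPasses (pg : List (List Bool)) (H W z : Int) (ys xs : List Int) : List Int → Option (String × String)
  | [] => none
  | p :: ps =>
    match aScanY pg H W (z - p) xs ys with
    | some r => some r
    | none => aPasses pg H W z ys xs ps

def strategy_max_block (playground : List (List Bool)) : Option (String × String) :=
  let z : Int := 5
  let H : Int := playground.length
  let W : Int := ((PySem.List.pyGet? playground 0).getD []).length
  aPasses playground H W z (PySem.List.pyRange 0 H 1) (PySem.List.pyRange 0 W 1)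
    (PySem.List.pyRange 0 5 1)

-- ===== PORT B =====
def bFree (pg : List (List Bool)) (H W y x : Int) : Bool :=
  decide (0 ≤ y) && decide (y < H) && decide (0 ≤ x) && decide (x < W) && (cellAt pg y x == false)

-- sum(1 for nb in neighbours if free(nb))
def bCount (pg : List (List Bool)) (H W y x : Int) : Int :=
  (([(y, x), (y + 1, x), (y - 1, x), (y, x + 1), (y, x - 1)] : List (Int × Int)).countP
    (fun c => bFree pg H W c.1 c.2) : Nat)

def bCells (H W : Int) : List (Int × Int) :=
  (PySem.List.pyRange 0 H 1).flatMap (fun y => (PySem.List.pyRange 0 W 1).map (fun x => (y, x)))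

def strategy_max_block_alt (playground : List (List Bool)) : Option (String × String) :=
  let H : Int := playground.length
  let W : Int := ((PySem.List.pyGet? playground 0).getD []).length
  let cells := bCells H W
  let best := cells.foldl (fun b c => max b (bCount playground H W c.1 c.2)) 0
  if best = 0 then none
  else
    (cells.find? (fun c => bCount playground H W c.1 c.2 == best)).map
      (fun c => (PySem.Int.toStr c.1, PySem.Int.toStr c.2))

-- ===== PRECONDITION & SPEC =====
-- Pre_ excludes inputs on which Python raises IndexError: the empty playground, and ragged playgrounds
-- with a row shorter than row 0 (there A may either raise or, if an early pass returns first, return;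
-- B's whole-table pass always raises — see claim.json cites).
def Pre_strategy_max_block (playground : List (List Bool)) : Prop :=
  playground ≠ [] ∧ ∀ row ∈ playground, (playground.headD []).length ≤ row.length
instance (playground : List (List Bool)) : Decidable (Pre_strategy_max_block playground) := by
  unfold Pre_strategy_max_block; infer_instance

def pvWitness_strategy_max_block : List (List Bool) := [[false, true], [true, false]]

def Spec_strategy_max_block (playground : List (List Bool)) (out : Option (String × String)) : Prop := out = strategy_max_block_alt playground
instance (playground : List (List Bool)) (out : Option (String × String)) : Decidable (Spec_strategy_max_block playground out) := by unfold Spec_strategy_max_block; infer_instance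

-- ===== CLAIM (what is proved, stated in full; the proofs are below) =====
def Claim_equal_strategy_max_block : Prop := ∀ (playground : List (List Bool)), Dom_strategy_max_block playground → Pre_strategy_max_block playground → Spec_strategy_max_block playground (strategy_max_block playground)

-- ===== LEMMAS AND PROOFS =====

theorem aCount_eq_bCount (pg : List (List Bool)) (H W y x : Int)
    (hy0 : 0 ≤ y) (hyH : y < H) (hx0 : 0 ≤ x) (hxW : x < W) :
    aCount pg H W y x = bCount pg H W y x := by
  have eC : ∀ h : Int, (if cellAt pg y x = false then h + 1 else h)
      = h + (if bFree pg H W y x then 1 else 0) := by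
    intro h; simp only [bFree, decide_eq_true hy0, decide_eq_true hyH, decide_eq_true hx0,
      decide_eq_true hxW, Bool.true_and, Bool.and_true]
    by_cases hc : cellAt pg y x = false <;> simp [hc]
  have eD : ∀ h : Int, (if y + 1 < H then (if cellAt pg (y + 1) x = false then h + 1 else h) else h)
      = h + (if bFree pg H W (y + 1) x then 1 else 0) := by
    intro h
    have h1 : (0:Int) ≤ y + 1 := by omega
    simp only [bFree, decide_eq_true h1, decide_eq_true hx0, decide_eq_true hxW,
      Bool.true_and, Bool.and_true]
    by_cases hg : y + 1 < H <;> by_cases hc : cellAt pg (y + 1) x = false <;> simp [hg, hc]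
  have eU : ∀ h : Int, (if y - 1 ≥ 0 then (if cellAt pg (y - 1) x = false then h + 1 else h) else h)
      = h + (if bFree pg H W (y - 1) x then 1 else 0) := by
    intro h
    have h1 : y - 1 < H := by omega
    simp only [bFree, decide_eq_true h1, decide_eq_true hx0, decide_eq_true hxW,
      Bool.and_true]
    split_ifs <;> (try simp_all) <;> omega
  have eR : ∀ h : Int, (if x + 1 < W then (if cellAt pg y (x + 1) = false then h + 1 else h) else h)
      = h + (if bFree pg H W y (x + 1) then 1 else 0) := by
    intro h
    have h1 : (0:Int) ≤ x + 1 := by omega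
    simp only [bFree, decide_eq_true hy0, decide_eq_true hyH, decide_eq_true h1,
      Bool.true_and, Bool.and_true]
    by_cases hg : x + 1 < W <;> by_cases hc : cellAt pg y (x + 1) = false <;> simp [hg, hc]
  have eL : ∀ h : Int, (if x - 1 ≥ 0 then (if cellAt pg y (x - 1) = false then h + 1 else h) else h)
      = h + (if bFree pg H W y (x - 1) then 1 else 0) := by
    intro h
    have h1 : x - 1 < W := by omega
    simp only [bFree, decide_eq_true hy0, decide_eq_true hyH, decide_eq_true h1,
      Bool.true_and, Bool.and_true]
    split_ifs <;> (try simp_all) <;> omega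
  have eB : bCount pg H W y x
      = ((((if bFree pg H W y x then (1:Int) else 0)
          + (if bFree pg H W (y + 1) x then 1 else 0))
          + (if bFree pg H W (y - 1) x then 1 else 0))
          + (if bFree pg H W y (x + 1) then 1 else 0))
          + (if bFree pg H W y (x - 1) then 1 else 0) := by
    simp only [bCount, List.countP_cons, List.countP_nil]
    push_cast
    split_ifs <;> simp
  simp only [aCount]
  rw [eC, eD, eU, eR, eL, eB]
  ring

-- proof-only helper: the result of one of A's passes with target t, expressed over B's cell list
def pvF (pg : List (List Bool)) (H W t : Int) : Option (String × String) :=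
  ((bCells H W).find? (fun c => bCount pg H W c.1 c.2 == t)).map
    (fun c => (PySem.Int.toStr c.1, PySem.Int.toStr c.2))

theorem find?_congr_mem' {a : Type} (l : List a) (p q : a → Bool) (h : ∀ x ∈ l, p x = q x) :
    l.find? p = l.find? q := by
  induction l with
  | nil => rfl
  | cons x l ih =>
    by_cases hq : q x = true
    · rw [List.find?_cons_of_pos (by rw [h x (by simp)]; exact hq), List.find?_cons_of_pos hq]
    · rw [List.find?_cons_of_neg (by rw [h x (by simp)]; exact hq),
        List.find?_cons_of_neg hq, ih (fun x hx => h x (by simp [hx]))]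

theorem mem_bCells {H W : Int} {c : Int × Int} :
    c ∈ bCells H W ↔ 0 ≤ c.1 ∧ c.1 < H ∧ 0 ≤ c.2 ∧ c.2 < W := by
  obtain ⟨y, x⟩ := c
  unfold bCells
  rw [List.mem_flatMap]
  constructor
  · rintro ⟨y', hy', hc⟩
    rw [List.mem_map] at hc
    obtain ⟨x', hx', hx''⟩ := hc
    injection hx'' with e1 e2
    subst e1; subst e2
    have h1 := (PySem.List.mem_pyRange_one).mp hy'
    have h2 := (PySem.List.mem_pyRange_one).mp hx'
    exact ⟨h1.1, h1.2, h2.1, h2.2⟩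
  · rintro ⟨h1, h2, h3, h4⟩
    exact ⟨y, (PySem.List.mem_pyRange_one).mpr ⟨h1, h2⟩,
      List.mem_map.mpr ⟨x, (PySem.List.mem_pyRange_one).mpr ⟨h3, h4⟩, rfl⟩⟩

theorem aScanX_eq (pg : List (List Bool)) (H W t y : Int) (xs : List Int) :
    aScanX pg H W t y xs
      = ((xs.map (fun x => (y, x))).find? (fun c => aCount pg H W c.1 c.2 == t)).map
          (fun c => (PySem.Int.toStr c.1, PySem.Int.toStr c.2)) := by
  induction xs with
  | nil => simp [aScanX]
  | cons x xs ih =>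
    simp only [aScanX, List.map_cons]
    by_cases hc : aCount pg H W y x = t
    · rw [if_pos hc, List.find?_cons_of_pos (by simpa using hc)]; rfl
    · rw [if_neg hc, List.find?_cons_of_neg (by simpa using hc), ih]

theorem aScanY_eq (pg : List (List Bool)) (H W t : Int) (xs ys : List Int) :
    aScanY pg H W t xs ys
      = ((ys.flatMap (fun y => xs.map (fun x => (y, x)))).find?
            (fun c => aCount pg H W c.1 c.2 == t)).map
          (fun c => (PySem.Int.toStr c.1, PySem.Int.toStr c.2)) := by
  induction ys with
  | nil => simp [aScanY]
  | cons y ys ih =>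
    simp only [aScanY, List.flatMap_cons, List.find?_append, aScanX_eq, ih]
    cases (xs.map (fun x => (y, x))).find? (fun c => aCount pg H W c.1 c.2 == t) <;> simp

theorem scanY_eq_F (pg : List (List Bool)) (H W t : Int) :
    aScanY pg H W t (PySem.List.pyRange 0 W 1) (PySem.List.pyRange 0 H 1) = pvF pg H W t := by
  rw [aScanY_eq]
  unfold pvF
  congr 1
  apply find?_congr_mem'
  intro c hc
  obtain ⟨h1, h2, h3, h4⟩ := mem_bCells.mp hc
  rw [aCount_eq_bCount pg H W c.1 c.2 h1 h2 h3 h4]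

theorem bCount_bounds (pg : List (List Bool)) (H W y x : Int) :
    0 ≤ bCount pg H W y x ∧ bCount pg H W y x ≤ 5 := by
  unfold bCount
  refine ⟨Int.natCast_nonneg _, ?_⟩
  have h := @List.countP_le_length (Int × Int)
    (fun c => bFree pg H W c.1 c.2)
    [(y, x), (y + 1, x), (y - 1, x), (y, x + 1), (y, x - 1)]
  simp only [List.length] at h
  exact_mod_cast h

theorem aPasses_eq (pg : List (List Bool)) (H W : Int) :
    aPasses pg H W 5 (PySem.List.pyRange 0 H 1) (PySem.List.pyRange 0 W 1) [0, 1, 2, 3, 4]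
      = (if (bCells H W).foldl (fun b c => max b (bCount pg H W c.1 c.2)) 0 = 0 then none
         else ((bCells H W).find?
                (fun c => bCount pg H W c.1 c.2
                  == (bCells H W).foldl (fun b c => max b (bCount pg H W c.1 c.2)) 0)).map
              (fun c => (PySem.Int.toStr c.1, PySem.Int.toStr c.2))) := by
  simp only [aPasses, scanY_eq_F]
  norm_num
  set best := (bCells H W).foldl (fun b c => max b (bCount pg H W c.1 c.2)) 0 with hbest
  have hfold : best = ((bCells H W).map (fun c => bCount pg H W c.1 c.2)).foldl max 0 := by
    rw [List.foldl_map]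
  have h0 : 0 ≤ best := by rw [hfold]; exact (PySem.List.le_foldl_max _ _).1
  have hub : ∀ c ∈ bCells H W, bCount pg H W c.1 c.2 ≤ best := by
    intro c hc
    rw [hfold]
    exact (PySem.List.le_foldl_max _ _).2 _ (List.mem_map_of_mem hc)
  have hmem : best = 0 ∨ ∃ c ∈ bCells H W, bCount pg H W c.1 c.2 = best := by
    rcases PySem.List.foldl_max_mem ((bCells H W).map (fun c => bCount pg H W c.1 c.2)) 0
      with h | h
    · left; rw [hfold]; exact h
    · right
      rw [← hfold] at h
      obtain ⟨c, hc, hce⟩ := List.mem_map.mp h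
      exact ⟨c, hc, hce⟩
  have h5 : best ≤ 5 := by
    rcases hmem with h | ⟨c, _, hce⟩
    · omega
    · rw [← hce]; exact (bCount_bounds pg H W c.1 c.2).2
  have hFnone : ∀ t : Int, best < t → pvF pg H W t = none := by
    intro t ht
    unfold pvF
    rw [List.find?_eq_none.mpr, Option.map_none]
    intro c hc
    have := hub c hc
    simp only [beq_iff_eq]
    omega
  have hFbest : ∀ rest : Option (String × String), best ≠ 0 →
      (match pvF pg H W best with
        | some r => some r
        | none => rest)
        = ((bCells H W).find? (fun c => bCount pg H W c.1 c.2 == best)).map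
            (fun c => (PySem.Int.toStr c.1, PySem.Int.toStr c.2)) := by
    intro rest hne
    rcases hmem with h | ⟨c, hc, hce⟩
    · exact absurd h hne
    · unfold pvF
      cases hf : (bCells H W).find? (fun c => bCount pg H W c.1 c.2 == best) with
      | none =>
        exact absurd hce (by simpa [beq_iff_eq] using List.find?_eq_none.mp hf c hc)
      | some r => simp
  rcases (by omega : best = 0 ∨ best = 1 ∨ best = 2 ∨ best = 3 ∨ best = 4 ∨ best = 5)
    with h | h | h | h | h | h
  · rw [hFnone 5 (by omega), hFnone 4 (by omega), hFnone 3 (by omega), hFnone 2 (by omega),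
      hFnone 1 (by omega)]
    simp [h]
  · rw [hFnone 5 (by omega), hFnone 4 (by omega), hFnone 3 (by omega), hFnone 2 (by omega),
      if_neg (by omega)]
    dsimp only
    rw [← h]
    exact hFbest _ (by omega)
  · rw [hFnone 5 (by omega), hFnone 4 (by omega), hFnone 3 (by omega), if_neg (by omega)]
    dsimp only
    rw [← h]
    exact hFbest _ (by omega)
  · rw [hFnone 5 (by omega), hFnone 4 (by omega), if_neg (by omega)]
    dsimp only
    rw [← h]
    exact hFbest _ (by omega)
  · rw [hFnone 5 (by omega), if_neg (by omega)]
    dsimp only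
    rw [← h]
    exact hFbest _ (by omega)
  · rw [if_neg (by omega)]
    rw [← h]
    exact hFbest _ (by omega)

-- ===== VERDICT (by name: the statement is the Claim_ definition above) =====
theorem strategy_max_block_spec : Claim_equal_strategy_max_block := by
  intro pg _ _
  show strategy_max_block pg = strategy_max_block_alt pg
  unfold strategy_max_block strategy_max_block_alt
  have hr : PySem.List.pyRange 0 5 1 = [0, 1, 2, 3, 4] := by decide
  simp only [hr]
  exact aPasses_eq pg _ _
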